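-- pv_equiv track=rewrite | github.com/databricks-solutions/vibe-coding-workshop-app | src/backend/services/dbsql_backend.py | _get_chapter_status
-- ===== SOURCE A (Python) =====
-- from typing import Any, Dict, List, Optional, Tuple, Union
--
-- CHAPTERS = {
--     "Foundation": {"steps": {1, 2, 3}, "display": "Foundation"},
--     "Chapter 1": {"steps": {4, 5}, "display": "Databricks App"},
--     "Chapter 2": {"steps": {6, 7, 8}, "display": "Lakebase"},
--     "Chapter 3": {"steps": {9, 10, 11, 12, 13, 14, 22}, "display": "Lakehouse"},
--     "Chapter 4": {"steps": {15, 16, 17, 18, 19}, "display": "Data Intelligence"},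
--     "Refinement": {"steps": {20, 21}, "display": "Refinement"},
--     "Agent Skills": {"steps": {26, 27, 28, 29, 30}, "display": "Agent Skills"},
-- }
--
-- def _get_chapter_status(completed_steps: List[int], skipped_steps: List[int] = None) -> Tuple[List[str], List[str]]:
--     completed_set = set(completed_steps)
--     skipped_set = set(skipped_steps) if skipped_steps else set()
--     done_set = completed_set | skipped_set
--     completed_chapters: List[str] = []
--     in_progress_chapters: List[str] = []
--     for _chapter_name, chapter_info in CHAPTERS.items():
--         chapter_steps = chapter_info["steps"]
--         done_in_chapter = done_set & chapter_steps
--         if done_in_chapter == chapter_steps: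
--             completed_chapters.append(chapter_info["display"])
--         elif done_in_chapter:
--             in_progress_chapters.append(chapter_info["display"])
--     return completed_chapters, in_progress_chapters
-- ===== SOURCE B (Python) =====
-- from typing import Any, Dict, List, Optional, Tuple, Union
--
-- CHAPTERS = {
--     "Foundation": {"steps": {1, 2, 3}, "display": "Foundation"},
--     "Chapter 1": {"steps": {4, 5}, "display": "Databricks App"},
--     "Chapter 2": {"steps": {6, 7, 8}, "display": "Lakebase"},
--     "Chapter 3": {"steps": {9, 10, 11, 12, 13, 14, 22}, "display": "Lakehouse"},
--     "Chapter 4": {"steps": {15, 16, 17, 18, 19}, "display": "Data Intelligence"},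
--     "Refinement": {"steps": {20, 21}, "display": "Refinement"},
--     "Agent Skills": {"steps": {26, 27, 28, 29, 30}, "display": "Agent Skills"},
-- }
--
-- # reverse map: step number -> chapter name (steps are disjoint across chapters)
-- _STEP_TO_CHAPTER = {}
-- for _name, _info in CHAPTERS.items():
--     for _s in _info["steps"]:
--         _STEP_TO_CHAPTER[_s] = _name
--
-- def _get_chapter_status(completed_steps: List[int], skipped_steps: List[int] = None) -> Tuple[List[str], List[str]]:
--     done = set(completed_steps) | set(skipped_steps or [])
--     counts = {}
--     for s in done:
--         name = _STEP_TO_CHAPTER.get(s)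
--         if name is not None:
--             counts[name] = counts.get(name, 0) + 1
--     completed_chapters: List[str] = []
--     in_progress_chapters: List[str] = []
--     for name, info in CHAPTERS.items():
--         c = counts.get(name, 0)
--         if c == len(info["steps"]):
--             completed_chapters.append(info["display"])
--         elif c > 0:
--             in_progress_chapters.append(info["display"])
--     return completed_chapters, in_progress_chapters
-- ===== Notes on version B (the rewrite author's own statement) =====
-- stated objective: alternative
-- what changed: Instead of intersecting the whole done-set with each chapter's step set, B builds a reverse step->chapter map once, tallies a per-chapter count in a single pass over the deduplicated done set, and then classifies each chapter by comparing its count to its step total.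
import Mathlib
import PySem

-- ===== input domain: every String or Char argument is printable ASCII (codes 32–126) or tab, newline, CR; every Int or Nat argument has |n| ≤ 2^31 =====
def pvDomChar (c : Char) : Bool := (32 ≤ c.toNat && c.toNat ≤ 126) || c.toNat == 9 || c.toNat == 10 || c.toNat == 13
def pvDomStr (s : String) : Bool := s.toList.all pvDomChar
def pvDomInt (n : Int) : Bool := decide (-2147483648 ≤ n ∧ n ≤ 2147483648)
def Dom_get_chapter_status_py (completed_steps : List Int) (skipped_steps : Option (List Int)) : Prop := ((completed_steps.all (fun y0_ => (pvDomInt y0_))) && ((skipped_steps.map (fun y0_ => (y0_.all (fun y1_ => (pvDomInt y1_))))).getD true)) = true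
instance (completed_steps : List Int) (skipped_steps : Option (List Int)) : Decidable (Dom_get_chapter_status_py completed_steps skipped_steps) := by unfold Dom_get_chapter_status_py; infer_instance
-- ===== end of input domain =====

-- B replaces A's per-chapter set intersections by a reverse step→chapter map and one
-- counting pass over the deduplicated done set (objective: alternative decomposition).

-- ===== PORT A =====
-- the module constant CHAPTERS: (name, steps, display); set literals as their element lists
def chaptersPy : List (String × List Int × String) :=
  [("Foundation", ([1, 2, 3], "Foundation")),
   ("Chapter 1", ([4, 5], "Databricks App")),
   ("Chapter 2", ([6, 7, 8], "Lakebase")),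
   ("Chapter 3", ([9, 10, 11, 12, 13, 14, 22], "Lakehouse")),
   ("Chapter 4", ([15, 16, 17, 18, 19], "Data Intelligence")),
   ("Refinement", ([20, 21], "Refinement")),
   ("Agent Skills", ([26, 27, 28, 29, 30], "Agent Skills"))]

-- A's loop body over one CHAPTERS entry
def chapStepA (done_set : PySem.Set Int) (acc : List String × List String)
    (ch : String × List Int × String) : List String × List String :=
  let chapter_steps : PySem.Set Int := PySem.Set.ofList ch.2.1
  let done_in_chapter := PySem.Set.inter done_set chapter_steps
  if PySem.Set.equal done_in_chapter chapter_steps then (acc.1 ++ [ch.2.2], acc.2)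
  else if !done_in_chapter.isEmpty then (acc.1, acc.2 ++ [ch.2.2])
  else acc

def get_chapter_status_py (completed_steps : List Int) (skipped_steps : Option (List Int)) : List String × List String :=
  let completed_set : PySem.Set Int := PySem.Set.ofList completed_steps
  let skipped_set : PySem.Set Int :=
    match skipped_steps with
    | some l => if l.isEmpty then PySem.Set.empty else PySem.Set.ofList l
    | none => PySem.Set.empty
  let done_set : PySem.Set Int := PySem.Set.union completed_set skipped_set
  chaptersPy.foldl (chapStepA done_set) ([], [])

-- ===== PORT B =====
-- reverse map step → chapter name, built once from CHAPTERS
def stepToChapterPy : PySem.Dict Int String :=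
  chaptersPy.foldl (fun d ch => ch.2.1.foldl (fun d s => d.insert s ch.1) d) PySem.Dict.empty

-- B's tally pass: per-chapter counts over the done set
def countsOf (done : PySem.Set Int) : PySem.Dict String Int :=
  done.foldl (fun c s =>
    match stepToChapterPy.get? s with
    | some name => c.modify name 0 (· + 1)
    | none => c) PySem.Dict.empty

-- B's classification pass over one CHAPTERS entry
def chapStepB (counts : PySem.Dict String Int) (acc : List String × List String)
    (ch : String × List Int × String) : List String × List String :=
  let c := counts.getD ch.1 0
  if c = (ch.2.1.length : Int) then (acc.1 ++ [ch.2.2], acc.2)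
  else if 0 < c then (acc.1, acc.2 ++ [ch.2.2])
  else acc

def get_chapter_status_py_alt (completed_steps : List Int) (skipped_steps : Option (List Int)) : List String × List String :=
  let done : PySem.Set Int :=
    PySem.Set.union (PySem.Set.ofList completed_steps) (PySem.Set.ofList (skipped_steps.getD []))
  chaptersPy.foldl (chapStepB (countsOf done)) ([], [])

-- ===== PRECONDITION & SPEC =====
def Spec_get_chapter_status_py (completed_steps : List Int) (skipped_steps : Option (List Int)) (out : List String × List String) : Prop := out = get_chapter_status_py_alt completed_steps skipped_steps
instance (completed_steps : List Int) (skipped_steps : Option (List Int)) (out : List String × List String) : Decidable (Spec_get_chapter_status_py completed_steps skipped_steps out) := by unfold Spec_get_chapter_status_py; infer_instance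

-- ===== CLAIM (what is proved, stated in full; the proofs are below) =====
def Claim_equal_get_chapter_status_py : Prop := ∀ (completed_steps : List Int) (skipped_steps : Option (List Int)), Dom_get_chapter_status_py completed_steps skipped_steps → Spec_get_chapter_status_py completed_steps skipped_steps (get_chapter_status_py completed_steps skipped_steps)

-- ===== LEMMAS AND PROOFS =====

-- the counting loop of B computes a count per chapter name
theorem countsOf_getD (ds : List Int) (c : PySem.Dict String Int) (name : String) :
    (ds.foldl (fun c s =>
      match stepToChapterPy.get? s with
      | some n => c.modify n 0 (· + 1)
      | none => c) c).getD name 0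
    = c.getD name 0 + (ds.countP (fun s => stepToChapterPy.get? s == some name) : Int) := by
  induction ds generalizing c with
  | nil => simp
  | cons s t ih =>
    simp only [List.foldl_cons, List.countP_cons, ih]
    cases h : stepToChapterPy.get? s with
    | none => simp
    | some n =>
      rw [PySem.Dict.getD_modify]
      by_cases hn : name = n
      · subst hn
        simp only [beq_self_eq_true, if_true]
        push_cast
        ring
      · have hb : (some n == some name) = false := by simp [Ne.symm hn]
        simp [hn, hb]

-- the literal value of the reverse map
theorem stepToChapterPy_lit : stepToChapterPy = PySem.Dict.mk
    [(1, "Foundation"), (2, "Foundation"), (3, "Foundation"),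
     (4, "Chapter 1"), (5, "Chapter 1"),
     (6, "Chapter 2"), (7, "Chapter 2"), (8, "Chapter 2"),
     (9, "Chapter 3"), (10, "Chapter 3"), (11, "Chapter 3"), (12, "Chapter 3"), (13, "Chapter 3"), (14, "Chapter 3"), (22, "Chapter 3"),
     (15, "Chapter 4"), (16, "Chapter 4"), (17, "Chapter 4"), (18, "Chapter 4"), (19, "Chapter 4"),
     (20, "Refinement"), (21, "Refinement"),
     (26, "Agent Skills"), (27, "Agent Skills"), (28, "Agent Skills"), (29, "Agent Skills"), (30, "Agent Skills")] := by
  rfl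

-- for each chapter of CHAPTERS: the reverse-map test is membership in that chapter's steps
theorem lookup_iff_mem (name : String) (st : List Int)
    (h : (name, st) ∈ ([("Foundation", [1, 2, 3]), ("Chapter 1", [4, 5]), ("Chapter 2", [6, 7, 8]),
        ("Chapter 3", [9, 10, 11, 12, 13, 14, 22]), ("Chapter 4", [15, 16, 17, 18, 19]),
        ("Refinement", [20, 21]), ("Agent Skills", [26, 27, 28, 29, 30])] : List (String × List Int)))
    (s : Int) :
    (stepToChapterPy.get? s == some name) = decide (s ∈ st) := by
  simp only [List.mem_cons, List.not_mem_nil, or_false, Prod.mk.injEq] at h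
  by_cases hs : s ∈ ([1, 2, 3, 4, 5, 6, 7, 8, 9, 10, 11, 12, 13, 14, 22, 15, 16, 17, 18, 19,
      20, 21, 26, 27, 28, 29, 30] : List Int)
  · simp only [List.mem_cons, List.not_mem_nil, or_false] at hs
    rcases h with ⟨rfl, rfl⟩ | ⟨rfl, rfl⟩ | ⟨rfl, rfl⟩ | ⟨rfl, rfl⟩ | ⟨rfl, rfl⟩ | ⟨rfl, rfl⟩ | ⟨rfl, rfl⟩ <;>
      rcases hs with rfl | rfl | rfl | rfl | rfl | rfl | rfl | rfl | rfl | rfl | rfl | rfl | rfl |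
        rfl | rfl | rfl | rfl | rfl | rfl | rfl | rfl | rfl | rfl | rfl | rfl | rfl | rfl <;>
      decide
  · have hnone : stepToChapterPy.get? s = none := by
      rw [stepToChapterPy_lit, PySem.Dict.get?_eq_none_iff_not_mem_keys]
      simpa using hs
    rw [hnone]
    simp only [List.mem_cons, List.not_mem_nil, or_false, not_or] at hs
    rcases h with ⟨rfl, rfl⟩ | ⟨rfl, rfl⟩ | ⟨rfl, rfl⟩ | ⟨rfl, rfl⟩ | ⟨rfl, rfl⟩ | ⟨rfl, rfl⟩ | ⟨rfl, rfl⟩ <;>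
      simp_all

-- A's completion test ↔ every chapter step is done
theorem equal_inter_iff (d st : List Int) :
    PySem.Set.equal (PySem.Set.inter d st) st = true ↔ ∀ x ∈ st, x ∈ d := by
  rw [PySem.Set.equal_iff]
  constructor
  · intro h x hx
    exact ((PySem.Set.mem_inter d st x).1 ((h x).2 hx)).1
  · intro h x
    rw [PySem.Set.mem_inter]
    exact ⟨fun hx => hx.2, fun hx => ⟨h x hx, hx⟩⟩

-- A's progress test ↔ some chapter step is done
theorem inter_nonempty_iff (d st : List Int) :
    ((PySem.Set.inter d st).isEmpty = false) ↔ ∃ x ∈ st, x ∈ d := by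
  rw [List.isEmpty_eq_false_iff_exists_mem]
  constructor
  · rintro ⟨x, hx⟩
    rw [PySem.Set.mem_inter] at hx
    exact ⟨x, hx.2, hx.1⟩
  · rintro ⟨x, hst, hd⟩
    exact ⟨x, (PySem.Set.mem_inter d st x).2 ⟨hd, hst⟩⟩

-- tallying done steps of a chapter = counting chapter steps that are done
theorem countP_mem_eq (ds st : List Int) (hds : ds.Nodup) (hst : st.Nodup) :
    ds.countP (fun s => decide (s ∈ st)) = (st.filter (fun x => decide (x ∈ ds))).length := by
  rw [List.countP_eq_length_filter]
  apply List.Perm.length_eq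
  apply List.perm_of_nodup_nodup_toFinset_eq (hds.filter _) (hst.filter _)
  ext x
  simp [and_comm]

-- one chapter: A's step and B's step agree
theorem step_agree (ds : List Int) (hds : ds.Nodup) (name : String) (st : List Int)
    (disp : String) (hst : st.Nodup)
    (hget : ∀ s, (stepToChapterPy.get? s == some name) = decide (s ∈ st))
    (acc : List String × List String) :
    chapStepA ds acc (name, st, disp) = chapStepB (countsOf ds) acc (name, st, disp) := by
  have hcount : (countsOf ds).getD name 0 = (ds.countP (fun s => decide (s ∈ st)) : Int) := by
    unfold countsOf
    rw [countsOf_getD]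
    rw [List.countP_congr (fun s _ => by rw [hget s])]
    simp
  have hfilter := countP_mem_eq ds st hds hst
  simp only [chapStepA, chapStepB, PySem.Set.ofList_eq_self_of_nodup st hst]
  have hA1 : (PySem.Set.equal (PySem.Set.inter ds st) st = true) ↔ ∀ x ∈ st, x ∈ ds :=
    equal_inter_iff ds st
  have hB1 : ((countsOf ds).getD name 0 = ((st.length : Nat) : Int)) ↔ ∀ x ∈ st, x ∈ ds := by
    rw [hcount, hfilter, Int.natCast_inj]
    constructor
    · intro h x hx
      have heq := (List.filter_sublist (l := st) (p := fun x => decide (x ∈ ds))).eq_of_length h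
      have : ∀ x ∈ st, decide (x ∈ ds) = true := List.filter_eq_self.mp heq
      simpa using this x hx
    · intro h
      rw [List.filter_eq_self.mpr (fun x hx => by simpa using h x hx)]
  have hB2 : (0 < (countsOf ds).getD name 0) ↔ ∃ x ∈ st, x ∈ ds := by
    rw [hcount, hfilter]
    constructor
    · intro h
      have hne : (st.filter (fun x => decide (x ∈ ds))) ≠ [] := by
        intro hnil; rw [hnil] at h; simp at h
      rcases List.exists_mem_of_ne_nil _ hne with ⟨x, hx⟩
      rw [List.mem_filter] at hx
      exact ⟨x, hx.1, by simpa using hx.2⟩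
    · rintro ⟨x, hst2, hd⟩
      have hm : x ∈ st.filter (fun x => decide (x ∈ ds)) := by
        rw [List.mem_filter]; exact ⟨hst2, by simpa using hd⟩
      exact_mod_cast List.length_pos_of_mem hm
  have hA2 : ((PySem.Set.inter ds st).isEmpty = false) ↔ ∃ x ∈ st, x ∈ ds :=
    inter_nonempty_iff ds st
  by_cases hP : ∀ x ∈ st, x ∈ ds
  · rw [if_pos (hA1.mpr hP), if_pos (hB1.mpr hP)]
  · rw [if_neg (fun hh => hP (hA1.mp hh)), if_neg (fun hh => hP (hB1.mp hh))]
    by_cases hQ : ∃ x ∈ st, x ∈ ds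
    · rw [if_pos (by simp [hA2.mpr hQ]), if_pos (hB2.mpr hQ)]
    · rw [if_neg (fun hh => hQ (hA2.mp (by simpa using hh))), if_neg (fun hh => hQ (hB2.mp hh))]

-- ===== VERDICT (by name: the statement is the Claim_ definition above) =====
theorem get_chapter_status_py_spec : Claim_equal_get_chapter_status_py := by
  intro cs ss hdom
  clear hdom
  unfold Spec_get_chapter_status_py
  simp only [get_chapter_status_py, get_chapter_status_py_alt]
  have hdone : (match ss with
      | some l => if l.isEmpty then PySem.Set.empty else PySem.Set.ofList l
      | none => PySem.Set.empty) = PySem.Set.ofList ((ss.getD []) : List Int) := by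
    cases ss with
    | none => rfl
    | some l => cases l <;> rfl
  rw [hdone]
  set ds := PySem.Set.union (PySem.Set.ofList cs) (PySem.Set.ofList ((ss.getD []) : List Int)) with hds_def
  have hds : ds.Nodup := PySem.Set.nodup_union _ _ (PySem.Set.nodup_ofList cs)
  apply PySem.List.foldl_congr_mem
  intro acc ch hch
  simp only [chaptersPy, List.mem_cons, List.not_mem_nil, or_false] at hch
  rcases hch with rfl | rfl | rfl | rfl | rfl | rfl | rfl <;>
    exact step_agree ds hds _ _ _ (by decide) (lookup_iff_mem _ _ (by decide)) acc
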